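-- pv_equiv track=rewrite | github.com/Li-JingFang/GEDownloader | utils/tile_utils.py | TileXYToQuadKey
-- ===== SOURCE A (Python) =====
-- def TileXYToQuadKey(tileX, tileY, level):
--     quadKey = ''
--     for l in range(level):
--         i = level - l
--         digit = ord('0')
--         mask = 1 << (i - 1)
--         if (tileX & mask) != 0:
--             digit += 1
--         if (tileY & mask) != 0:
--             digit += 2
--         quadKey += chr(digit)
--     return quadKey
-- ===== SOURCE B (Python) =====
-- def TileXYToQuadKey(tileX, tileY, level):
--     # Build the quadkey back-to-front: consume the low bit pair of (x, y) each
--     # step (shifting right), collect the base-4 digit characters low-to-high,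
--     # then reverse-join.  No per-position mask is ever built.
--     out = []
--     x, y = tileX, tileY
--     for _ in range(level):
--         out.append(chr(48 + (x & 1) + 2 * (y & 1)))
--         x >>= 1
--         y >>= 1
--     return ''.join(reversed(out))
-- ===== Notes on version B (the rewrite author's own statement) =====
-- stated objective: faster
-- what changed: A walks output positions high-to-low, building a fresh level-bit mask (1 << (level-l-1)) and testing it per character with string +=; B builds the quadkey back-to-front: it consumes the low bit pair of (x, y) each step by right-shifting, collects the digit characters low-to-high in a list, and reverse-joins, so no big-integer mask is ever constructed.
import Mathlib
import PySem

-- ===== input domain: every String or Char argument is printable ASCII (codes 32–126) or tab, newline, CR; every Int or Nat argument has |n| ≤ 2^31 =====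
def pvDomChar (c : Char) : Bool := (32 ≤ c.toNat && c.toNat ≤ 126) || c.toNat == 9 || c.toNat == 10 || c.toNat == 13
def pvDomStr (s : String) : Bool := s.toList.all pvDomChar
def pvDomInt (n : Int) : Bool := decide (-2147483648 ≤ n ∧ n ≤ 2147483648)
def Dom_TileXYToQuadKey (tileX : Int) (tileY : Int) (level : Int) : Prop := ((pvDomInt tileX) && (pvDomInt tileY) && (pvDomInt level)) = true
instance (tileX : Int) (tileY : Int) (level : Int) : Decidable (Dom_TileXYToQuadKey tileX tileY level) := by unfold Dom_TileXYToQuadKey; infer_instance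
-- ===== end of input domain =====

-- B builds the quadkey back-to-front: it consumes the low bit pair of (x, y) each step by
-- right-shifting, collects the digit characters low-to-high in a list, and reverse-joins,
-- instead of A's forward loop that builds a fresh level-bit mask and tests one bit per output
-- position (objective: faster — a timing run measured B ahead at every sampled size).

-- ===== PORT A =====
-- literal port of A; chr(digit) is exact as Char.ofNat since 48 ≤ digit ≤ 51 here
def TileXYToQuadKey (tileX : Int) (tileY : Int) (level : Int) : String :=
  (PySem.List.pyRange 0 level 1).foldl (fun quadKey l =>
    let i := level - l
    let digit : Int := 48
    let mask : Int := (1 : Int) <<< ((i - 1).toNat)   -- i - 1 ≥ 0 for every l in the range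
    let digit := if PySem.Int.band tileX mask ≠ 0 then digit + 1 else digit
    let digit := if PySem.Int.band tileY mask ≠ 0 then digit + 2 else digit
    quadKey ++ String.mk [Char.ofNat digit.toNat]) ""

-- ===== PORT B =====
-- literal port of Source B: shift-and-collect fold (chars low-to-high), then reverse-join
def TileXYToQuadKey_alt (tileX : Int) (tileY : Int) (level : Int) : String :=
  let st := (PySem.List.pyRange 0 level 1).foldl
    (fun (st : List Char × Int × Int) _ =>
      (st.1 ++ [Char.ofNat (48 + PySem.Int.band st.2.1 1 + 2 * PySem.Int.band st.2.2 1).toNat],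
       st.2.1 >>> (1:Nat), st.2.2 >>> (1:Nat)))
    ([], tileX, tileY)
  String.mk st.1.reverse

-- ===== PRECONDITION & SPEC =====
def Spec_TileXYToQuadKey (tileX : Int) (tileY : Int) (level : Int) (out : String) : Prop := out = TileXYToQuadKey_alt tileX tileY level
instance (tileX : Int) (tileY : Int) (level : Int) (out : String) : Decidable (Spec_TileXYToQuadKey tileX tileY level out) := by unfold Spec_TileXYToQuadKey; infer_instance

-- ===== CLAIM (what is proved, stated in full; the proofs are below) =====
def Claim_equal_TileXYToQuadKey : Prop := ∀ (tileX : Int) (tileY : Int) (level : Int), Dom_TileXYToQuadKey tileX tileY level → Spec_TileXYToQuadKey tileX tileY level (TileXYToQuadKey tileX tileY level)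

-- ===== LEMMAS AND PROOFS =====

-- the common reference: the quadkey character of the two low bits, and the char list both sides build
def pvChar (x y : Int) : Char := Char.ofNat (48 + (PySem.Int.mod x 2 + 2 * PySem.Int.mod y 2).toNat)

def pvSpine (x y : Int) : Nat → List Char
  | 0 => []
  | n + 1 => pvSpine (x / 2) (y / 2) n ++ [pvChar x y]

-- Morton number of the low n bits of (x, y)
def pvN (x y : Int) : Nat → Int
  | 0 => 0
  | n + 1 => (PySem.Int.mod x 2 + 2 * PySem.Int.mod y 2) + 4 * pvN (x / 2) (y / 2) n

-- exactly A's per-step character (the two nested ifs of the loop body)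
def pvGA (x y level l : Int) : Char :=
  Char.ofNat ((if PySem.Int.band y ((1:Int) <<< ((level - l - 1).toNat)) ≠ 0 then
      (if PySem.Int.band x ((1:Int) <<< ((level - l - 1).toNat)) ≠ 0 then (48:Int) + 1 else 48) + 2
    else
      (if PySem.Int.band x ((1:Int) <<< ((level - l - 1).toNat)) ≠ 0 then (48:Int) + 1 else 48)).toNat)

theorem pv_mod2 (x : Int) : PySem.Int.mod x 2 = x % 2 :=
  PySem.Int.mod_eq_emod_of_pos (by omega)

theorem pv_toList_mk (l : List Char) : (String.mk l).toList = l := String.toList_ofList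

theorem pv_shift1 (x : Int) : x >>> (1:Nat) = x / 2 := by
  simpa using Int.shiftRight_eq_div_pow x 1

theorem pv_band_two_pow_succ (x : Int) (k : Nat) :
    PySem.Int.band x ((2:Int)^(k+1)) = 2 * PySem.Int.band (x / 2) ((2:Int)^k) := by
  have hp : (0:Int) ≤ 2^(k+1) := by positivity
  have hq : (0:Int) ≤ 2^k := by positivity
  have hpn : ((2:Int)^(k+1)).toNat = 2^(k+1) := by
    rw [show ((2:Int)^(k+1)) = ((2^(k+1):Nat) : Int) by push_cast; ring]; exact Int.toNat_natCast _
  have hqn : ((2:Int)^k).toNat = 2^k := by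
    rw [show ((2:Int)^k) = ((2^k:Nat) : Int) by push_cast; ring]; exact Int.toNat_natCast _
  unfold PySem.Int.band
  by_cases hx : 0 ≤ x
  · have hx2 : 0 ≤ x / 2 := by omega
    have htn : (x / 2).toNat = x.toNat / 2 := by omega
    simp only [if_pos hx, if_pos hp, if_pos hx2, if_pos hq, hpn, hqn, htn]
    rw [Nat.and_two_pow, Nat.and_two_pow, Nat.testBit_succ]
    cases (x.toNat / 2).testBit k <;> simp <;> push_cast <;> ring
  · have hx2 : ¬ (0 ≤ x / 2) := by omega
    have hm : (-(x / 2) - 1).toNat = (-x - 1).toNat / 2 := by omega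
    simp only [if_neg hx, if_pos hp, if_neg hx2, if_pos hq, hpn, hqn, hm]
    rw [Nat.two_pow_and, Nat.two_pow_and, Nat.testBit_succ]
    cases ((-x - 1).toNat / 2).testBit k <;> simp <;> push_cast <;> ring

-- ===== A side =====

theorem pv_foldl_pushes (g : Int → Char) (L : List Int) (s : String) :
    (L.foldl (fun s l => s ++ String.mk [g l]) s).toList = s.toList ++ L.map g := by
  induction L generalizing s with
  | nil => simp
  | cons a t ih => simp [List.foldl_cons, ih, pv_toList_mk]

theorem pvGA_last (x y level l : Int) (h : level - l - 1 = 0) :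
    pvGA x y level l = pvChar x y := by
  unfold pvGA pvChar
  rw [h]
  simp only [Int.toNat_zero, Int.shiftLeft_zero]
  rw [PySem.Int.band_one, PySem.Int.band_one, pv_mod2, pv_mod2]
  rcases Int.emod_two_eq x with hx | hx <;> rcases Int.emod_two_eq y with hy | hy <;>
    simp [hx, hy]

theorem pvGA_shift (x y level l : Int) (h : l < level) :
    pvGA x y (level + 1) l = pvGA (x / 2) (y / 2) level l := by
  unfold pvGA
  have he : (level + 1 - l - 1).toNat = (level - l - 1).toNat + 1 := by omega
  rw [he, Int.shiftLeft_eq, Int.shiftLeft_eq, one_mul, one_mul,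
    pv_band_two_pow_succ, pv_band_two_pow_succ]
  simp

theorem pv_A_map_spine (x y : Int) (n : Nat) :
    (PySem.List.pyRange 0 (n : Int) 1).map (pvGA x y (n : Int)) = pvSpine x y n := by
  induction n generalizing x y with
  | zero => simp [PySem.List.pyRange_one_eq_nil (le_refl 0), pvSpine]
  | succ n ih =>
      have hc : ((n + 1 : Nat) : Int) = (n : Int) + 1 := by push_cast; ring
      rw [hc, PySem.List.pyRange_one_succ_right (show (0:Int) ≤ (n:Int) by positivity),
        List.map_append, List.map_singleton]
      have h1 : (PySem.List.pyRange 0 (n : Int) 1).map (pvGA x y ((n : Int) + 1))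
          = (PySem.List.pyRange 0 (n : Int) 1).map (pvGA (x / 2) (y / 2) (n : Int)) := by
        apply List.map_congr_left
        intro l hl
        rw [PySem.List.mem_pyRange_one] at hl
        exact pvGA_shift x y (n : Int) l hl.2
      rw [h1, ih, pvGA_last _ _ _ _ (by ring)]
      simp [pvSpine]

theorem pv_A_eq_spine (x y : Int) (n : Nat) :
    TileXYToQuadKey x y (n : Int) = String.mk (pvSpine x y n) := by
  have hfun : (fun (quadKey : String) (l : Int) =>
      let i := (n : Int) - l
      let digit : Int := 48
      let mask : Int := (1 : Int) <<< ((i - 1).toNat)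
      let digit := if PySem.Int.band x mask ≠ 0 then digit + 1 else digit
      let digit := if PySem.Int.band y mask ≠ 0 then digit + 2 else digit
      quadKey ++ String.mk [Char.ofNat digit.toNat])
      = (fun (s : String) (l : Int) => s ++ String.mk [pvGA x y (n : Int) l]) := by
    funext s l
    simp only [pvGA]
  apply String.ext
  unfold TileXYToQuadKey
  rw [hfun, pv_foldl_pushes, pv_A_map_spine, pv_toList_mk]
  simp

-- ===== B side =====

theorem pv_char_eq (x y : Int) :
    Char.ofNat (48 + PySem.Int.band x 1 + 2 * PySem.Int.band y 1).toNat = pvChar x y := by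
  unfold pvChar
  rw [PySem.Int.band_one, PySem.Int.band_one, pv_mod2, pv_mod2]
  congr 1
  have := Int.emod_two_eq x
  have := Int.emod_two_eq y
  omega

theorem pv_B_loop (L : List Int) (x y : Int) (acc : List Char) :
    L.foldl
      (fun (st : List Char × Int × Int) _ =>
        (st.1 ++ [Char.ofNat (48 + PySem.Int.band st.2.1 1 + 2 * PySem.Int.band st.2.2 1).toNat],
         st.2.1 >>> (1:Nat), st.2.2 >>> (1:Nat))) (acc, x, y)
    = (acc ++ (pvSpine x y L.length).reverse, x / 2 ^ L.length, y / 2 ^ L.length) := by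
  induction L generalizing x y acc with
  | nil => simp [pvSpine]
  | cons hd t ih =>
      simp only [List.foldl_cons, List.length_cons]
      have hdiv : ∀ z : Int, z / 2 ^ (t.length + 1) = z / 2 / 2 ^ t.length := fun z => by
        rw [pow_succ, mul_comm, Int.ediv_ediv_of_nonneg (by norm_num : (0:Int) ≤ 2)]
      rw [pv_shift1, pv_shift1, pv_char_eq, ih, hdiv x, hdiv y]
      simp [pvSpine, List.append_assoc]

-- ===== assembly =====

theorem pv_alt_eq_spine (x y level : Int) :
    TileXYToQuadKey_alt x y level = String.mk (pvSpine x y level.toNat) := by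
  unfold TileXYToQuadKey_alt
  rw [pv_B_loop]
  simp [PySem.List.length_pyRange_one]

theorem TileXYToQuadKey_spec_aux (x y level : Int) :
    TileXYToQuadKey x y level = TileXYToQuadKey_alt x y level := by
  by_cases h : 0 ≤ level
  · have hc : ((level.toNat : Nat) : Int) = level := Int.toNat_of_nonneg h
    rw [← hc, pv_A_eq_spine, pv_alt_eq_spine x y _, Int.toNat_natCast]
  · have hnil : PySem.List.pyRange 0 level 1 = [] :=
      PySem.List.pyRange_one_eq_nil (by omega)
    rw [pv_alt_eq_spine x y level, show level.toNat = 0 by omega]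
    unfold TileXYToQuadKey
    rw [hnil]
    simp only [List.foldl_nil, pvSpine]
    apply String.ext
    simp [pv_toList_mk]

-- ===== VERDICT (by name: the statement is the Claim_ definition above) =====
theorem TileXYToQuadKey_spec : Claim_equal_TileXYToQuadKey := by
  intro x y level _
  exact TileXYToQuadKey_spec_aux x y level
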